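-- pv_equiv track=rewrite | github.com/Hal-9k1/PIE-Fall-2023 | qual_finals_code.py | _HELPER_translate_line_no
-- ===== SOURCE A (Python) =====
-- _HELPER_entry_point_line_nums = [18, 25, 30, 38, 44, 52, 60, 70, 74, 81]
--
-- def _HELPER_translate_line_no(line_no):
--     if line_no >= 978:
--         skipped_lines = 0
--         for entry_point_line_num in _HELPER_entry_point_line_nums:
--             if entry_point_line_num + 978 <= line_no:
--                 skipped_lines += 1
--             else:
--                 break
--         return 'main', line_no - 978 - skipped_lines
--     elif line_no >= 890:
--         return 'path', line_no - 895
--     elif line_no >= 849: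
--         return 'util', line_no - 854
--     elif line_no >= 724:
--         return 'devices', line_no - 729
--     elif line_no >= 417:
--         return 'chassis', line_no - 422
--     elif line_no >= 259:
--         return 'input', line_no - 264
--     elif line_no >= 151:
--         return 'peripherals', line_no - 156
--     elif line_no >= 54:
--         return 'mock_robot', line_no - 59
-- ===== SOURCE B (Python) =====
-- _HELPER_entry_point_line_nums = [18, 25, 30, 38, 44, 52, 60, 70, 74, 81]
--
-- _HELPER_module_table = [
--     (890, 'path', 895),
--     (849, 'util', 854),
--     (724, 'devices', 729),
--     (417, 'chassis', 422),
--     (259, 'input', 264),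
--     (151, 'peripherals', 156),
--     (54, 'mock_robot', 59),
-- ]
--
-- def _bisect_right(a, x):
--     lo, hi = 0, len(a)
--     while lo < hi:
--         mid = (lo + hi) // 2
--         if x < a[mid]:
--             hi = mid
--         else:
--             lo = mid + 1
--     return lo
--
-- def _HELPER_translate_line_no(line_no):
--     if line_no >= 978:
--         skipped = _bisect_right(_HELPER_entry_point_line_nums, line_no - 978)
--         return 'main', line_no - 978 - skipped
--     for threshold, name, base in _HELPER_module_table:
--         if line_no >= threshold:
--             return name, line_no - base
-- ===== Notes on version B (the rewrite author's own statement) =====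
-- stated objective: simpler
-- what changed: Replaces the hard-coded branch cascade by a data-driven (threshold, module, base) table scanned once, and replaces the break-loop that counts skipped entry points by a binary search (hand-written bisect_right) over the sorted entry-point list.
-- outside the precondition, e.g. on _HELPER_translate_line_no(10): A returns None, B returns None
import Mathlib
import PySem

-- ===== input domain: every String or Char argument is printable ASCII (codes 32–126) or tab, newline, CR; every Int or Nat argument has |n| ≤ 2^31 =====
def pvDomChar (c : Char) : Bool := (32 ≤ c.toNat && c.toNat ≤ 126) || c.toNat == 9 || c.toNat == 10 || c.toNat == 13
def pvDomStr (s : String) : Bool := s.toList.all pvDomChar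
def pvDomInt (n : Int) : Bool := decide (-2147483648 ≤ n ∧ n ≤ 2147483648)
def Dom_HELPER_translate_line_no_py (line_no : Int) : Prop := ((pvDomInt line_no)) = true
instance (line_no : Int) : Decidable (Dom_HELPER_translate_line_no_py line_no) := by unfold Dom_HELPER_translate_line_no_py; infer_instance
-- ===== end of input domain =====

-- B replaces A's branch cascade by a data-driven threshold table and A's break-loop
-- count of skipped entry points by a binary search over the sorted entry-point list (objective: simpler).

-- ===== PORT A =====
def aEntryPoints : List Int := [18, 25, 30, 38, 44, 52, 60, 70, 74, 81]

-- the for-loop with break counting skipped entry points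
def aSkip (line_no : Int) : List Int → Int
  | [] => 0
  | e :: rest => if e + 978 ≤ line_no then 1 + aSkip line_no rest else 0

def HELPER_translate_line_no_py (line_no : Int) : String × Int :=
  if line_no ≥ 978 then ("main", line_no - 978 - aSkip line_no aEntryPoints)
  else if line_no ≥ 890 then ("path", line_no - 895)
  else if line_no ≥ 849 then ("util", line_no - 854)
  else if line_no ≥ 724 then ("devices", line_no - 729)
  else if line_no ≥ 417 then ("chassis", line_no - 422)
  else if line_no ≥ 259 then ("input", line_no - 264)
  else if line_no ≥ 151 then ("peripherals", line_no - 156)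
  else if line_no ≥ 54 then ("mock_robot", line_no - 59)
  else ("", 0)  -- Python returns None here; excluded by Pre_

-- ===== PORT B =====
def bTable : List (Int × String × Int) :=
  [(890, "path", 895), (849, "util", 854), (724, "devices", 729),
   (417, "chassis", 422), (259, "input", 264), (151, "peripherals", 156),
   (54, "mock_robot", 59)]

-- hand-written bisect_right while-loop from Source B
def bBisect (a : List Int) (x : Int) (lo hi : Nat) : Nat :=
  if h : lo < hi then
    let mid := (lo + hi) / 2
    if x < a.getD mid 0 then bBisect a x lo mid
    else bBisect a x (mid + 1) hi
  else lo
termination_by hi - lo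
decreasing_by all_goals omega

-- the for-loop over the table from Source B
def bLookup (line_no : Int) : List (Int × String × Int) → String × Int
  | [] => ("", 0)  -- Python returns None here; excluded by Pre_
  | (thr, name, base) :: rest =>
      if line_no ≥ thr then (name, line_no - base) else bLookup line_no rest

def HELPER_translate_line_no_py_alt (line_no : Int) : String × Int :=
  if line_no ≥ 978 then
    ("main", line_no - 978 - (bBisect aEntryPoints (line_no - 978) 0 aEntryPoints.length : Int))
  else
    bLookup line_no bTable

-- ===== PRECONDITION & SPEC =====
-- Pre_ excludes line_no < 54, where the Python A (and B) return None, not a (str, int) pair.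
def Pre_HELPER_translate_line_no_py (line_no : Int) : Prop := 54 ≤ line_no
instance (line_no : Int) : Decidable (Pre_HELPER_translate_line_no_py line_no) := by unfold Pre_HELPER_translate_line_no_py; infer_instance
def pvWitness_HELPER_translate_line_no_py : Int := 1000

def Spec_HELPER_translate_line_no_py (line_no : Int) (out : String × Int) : Prop := out = HELPER_translate_line_no_py_alt line_no
instance (line_no : Int) (out : String × Int) : Decidable (Spec_HELPER_translate_line_no_py line_no out) := by unfold Spec_HELPER_translate_line_no_py; infer_instance

-- ===== CLAIM (what is proved, stated in full; the proofs are below) =====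
def Claim_equal_HELPER_translate_line_no_py : Prop := ∀ (line_no : Int), Dom_HELPER_translate_line_no_py line_no → Pre_HELPER_translate_line_no_py line_no → Spec_HELPER_translate_line_no_py line_no (HELPER_translate_line_no_py line_no)

-- ===== LEMMAS AND PROOFS =====

-- the binary search over the fixed entry-point list counts exactly what A's break-loop counts
set_option maxHeartbeats 1600000 in
lemma bisect_eq_skip (line_no : Int) (h : 978 ≤ line_no) :
    (bBisect aEntryPoints (line_no - 978) 0 aEntryPoints.length : Int) = aSkip line_no aEntryPoints := by
  simp only [aEntryPoints, List.length_cons, List.length_nil]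
  rw [bBisect]; norm_num [List.getD]; split_ifs
  all_goals try (rw [bBisect]; norm_num [List.getD]; try split_ifs)
  all_goals try (rw [bBisect]; norm_num [List.getD]; try split_ifs)
  all_goals try (rw [bBisect]; norm_num [List.getD]; try split_ifs)
  all_goals try (rw [bBisect]; norm_num [List.getD]; try split_ifs)
  all_goals (simp only [aSkip]; split_ifs <;> omega)

-- ===== VERDICT (by name: the statement is the Claim_ definition above) =====
theorem HELPER_translate_line_no_py_spec : Claim_equal_HELPER_translate_line_no_py := by
  intro line_no _ hpre
  unfold Pre_HELPER_translate_line_no_py at hpre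
  unfold Spec_HELPER_translate_line_no_py HELPER_translate_line_no_py HELPER_translate_line_no_py_alt
  by_cases h978 : line_no ≥ 978
  · simp only [h978, if_true]
    rw [bisect_eq_skip line_no h978]
  · simp only [h978, if_false, bTable, bLookup]
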